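-- pv_equiv track=rewrite | github.com/philosophy-simul/ibe_er_simulations | ibe_er.py | adjust_thresholds
-- ===== SOURCE A (Python) =====
-- def adjust_thresholds(thresholds, uncert_lower, uncert_upper):
--     thresholds = sorted(thresholds)  # ensure thresholds are sorted
--
--     below_or_equal = [t for t in thresholds if t <= uncert_lower]
--     above_or_equal = [t for t in thresholds if t >= uncert_upper]
--     between = [t for t in thresholds if uncert_lower < t < uncert_upper]
--
--     result = []
--     if below_or_equal:
--         result.append(below_or_equal[-1])  # keep the highest ≤ uncert_lower
--     result += between
--     if above_or_equal:
--         result.append(above_or_equal[0])  # keep the lowest ≥ uncert_upper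
--
--     return result
-- ===== SOURCE B (Python) =====
-- import bisect
--
-- def adjust_thresholds(thresholds, uncert_lower, uncert_upper):
--     # binary searches over the sorted list instead of three filtering passes
--     ts = sorted(thresholds)
--     i = bisect.bisect_right(ts, uncert_lower)  # number of elements <= uncert_lower
--     j = bisect.bisect_left(ts, uncert_upper)   # number of elements < uncert_upper
--     res = []
--     if i > 0:
--         res.append(ts[i - 1])      # highest element <= uncert_lower
--     res.extend(ts[i:j])            # strictly-between elements, already sorted
--     if j < len(ts):
--         res.append(ts[j])          # lowest element >= uncert_upper
--     return res
-- ===== Notes on version B (the rewrite author's own statement) =====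
-- stated objective: idiomatic
-- what changed: Replaces A's three linear filtering passes over the sorted list with two binary searches (bisect_right at the lower bound, bisect_left at the upper bound) and assembles the result from the resulting indices and one slice.
import Mathlib
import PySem

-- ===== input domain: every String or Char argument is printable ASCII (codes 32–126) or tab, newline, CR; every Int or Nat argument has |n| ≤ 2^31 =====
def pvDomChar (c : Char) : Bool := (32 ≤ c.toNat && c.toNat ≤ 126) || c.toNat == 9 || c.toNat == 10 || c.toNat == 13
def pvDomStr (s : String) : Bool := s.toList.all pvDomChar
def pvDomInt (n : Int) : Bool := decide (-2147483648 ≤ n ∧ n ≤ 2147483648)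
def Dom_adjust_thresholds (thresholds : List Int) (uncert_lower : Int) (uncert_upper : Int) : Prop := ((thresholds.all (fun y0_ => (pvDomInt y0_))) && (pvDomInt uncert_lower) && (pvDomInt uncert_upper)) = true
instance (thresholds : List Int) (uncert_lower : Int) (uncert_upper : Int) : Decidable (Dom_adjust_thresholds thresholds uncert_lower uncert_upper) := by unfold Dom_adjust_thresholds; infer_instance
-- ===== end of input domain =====

-- ===== PORT A =====
-- B replaces A's three filtering passes by two binary searches (bisect) over the sorted list; objective: idiomatic.
def adjust_thresholds (thresholds : List Int) (uncert_lower : Int) (uncert_upper : Int) : List Int :=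
  let ts := PySem.List.sorted thresholds (fun x => x) false
  let below_or_equal := ts.filter (fun t => t ≤ uncert_lower)
  let above_or_equal := ts.filter (fun t => t ≥ uncert_upper)
  let between := ts.filter (fun t => uncert_lower < t && t < uncert_upper)
  ((match below_or_equal.getLast? with | some x => [x] | none => ([] : List Int))
    ++ between)
    ++ (match above_or_equal.head? with | some x => [x] | none => ([] : List Int))

-- ===== PORT B =====
def adjust_thresholds_alt (thresholds : List Int) (uncert_lower : Int) (uncert_upper : Int) : List Int :=
  let ts := PySem.List.sorted thresholds (fun x => x) false
  let i := PySem.List.bisectRight ts uncert_lower   -- bisect.bisect_right(ts, uncert_lower)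
  let j := PySem.List.bisectLeft ts uncert_upper    -- bisect.bisect_left(ts, uncert_upper)
  -- ts[i-1] / ts[j] via getD (exact: the guards put the index in range); ts[i:j] with 0 ≤ i, j is drop/take
  ((if 0 < i then [ts.getD (i - 1) 0] else ([] : List Int))
    ++ (ts.drop i).take (j - i))
    ++ (if j < ts.length then [ts.getD j 0] else ([] : List Int))

-- ===== PRECONDITION & SPEC =====
def Spec_adjust_thresholds (thresholds : List Int) (uncert_lower : Int) (uncert_upper : Int) (out : List Int) : Prop := out = adjust_thresholds_alt thresholds uncert_lower uncert_upper
instance (thresholds : List Int) (uncert_lower : Int) (uncert_upper : Int) (out : List Int) : Decidable (Spec_adjust_thresholds thresholds uncert_lower uncert_upper out) := by unfold Spec_adjust_thresholds; infer_instance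

-- ===== CLAIM (what is proved, stated in full; the proofs are below) =====
def Claim_equal_adjust_thresholds : Prop := ∀ (thresholds : List Int) (uncert_lower : Int) (uncert_upper : Int), Dom_adjust_thresholds thresholds uncert_lower uncert_upper → Spec_adjust_thresholds thresholds uncert_lower uncert_upper (adjust_thresholds thresholds uncert_lower uncert_upper)

-- ===== LEMMAS AND PROOFS =====
-- a filter whose predicate holds exactly on the first i positions is a take
theorem filter_eq_take_of_index (p : Int → Bool) (ts : List Int) (i : Nat) (hi : i ≤ ts.length)
    (h1 : ∀ k (hk : k < ts.length), k < i → p ts[k])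
    (h2 : ∀ k (hk : k < ts.length), i ≤ k → ¬ p ts[k]) :
    ts.filter p = ts.take i := by
  conv_lhs => rw [← List.take_append_drop i ts]
  rw [List.filter_append]
  have hA : (ts.take i).filter p = ts.take i := by
    apply List.filter_eq_self.mpr
    intro a ha
    obtain ⟨k, hk, rfl⟩ := List.mem_iff_getElem.mp ha
    have hk' : k < i := lt_of_lt_of_le hk (by simp)
    rw [List.getElem_take]
    exact h1 k (by omega) hk'
  have hB : (ts.drop i).filter p = [] := by
    apply List.filter_eq_nil_iff.mpr
    intro a ha
    obtain ⟨k, hk, rfl⟩ := List.mem_iff_getElem.mp ha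
    rw [List.getElem_drop]
    exact h2 (i + k) (by simp at hk; omega) (by omega)
  rw [hA, hB, List.append_nil]

-- a filter whose predicate fails exactly on the first i positions is a drop
theorem filter_eq_drop_of_index (p : Int → Bool) (ts : List Int) (i : Nat) (hi : i ≤ ts.length)
    (h1 : ∀ k (hk : k < ts.length), k < i → ¬ p ts[k])
    (h2 : ∀ k (hk : k < ts.length), i ≤ k → p ts[k]) :
    ts.filter p = ts.drop i := by
  conv_lhs => rw [← List.take_append_drop i ts]
  rw [List.filter_append]
  have hA : (ts.take i).filter p = [] := by
    apply List.filter_eq_nil_iff.mpr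
    intro a ha
    obtain ⟨k, hk, rfl⟩ := List.mem_iff_getElem.mp ha
    have hk' : k < i := lt_of_lt_of_le hk (by simp)
    rw [List.getElem_take]
    exact h1 k (by omega) hk'
  have hB : (ts.drop i).filter p = ts.drop i := by
    apply List.filter_eq_self.mpr
    intro a ha
    obtain ⟨k, hk, rfl⟩ := List.mem_iff_getElem.mp ha
    rw [List.getElem_drop]
    exact h2 (i + k) (by simp at hk; omega) (by omega)
  rw [hA, hB, List.nil_append]

-- ===== VERDICT (by name: the statement is the Claim_ definition above) =====
theorem adjust_thresholds_spec : Claim_equal_adjust_thresholds := by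
  intro thresholds l u _
  unfold Spec_adjust_thresholds adjust_thresholds adjust_thresholds_alt
  dsimp only
  set ts := PySem.List.sorted thresholds (fun x => x) false with hts
  have hs : List.Pairwise (fun a b => a ≤ b) ts := PySem.List.sorted_pairwise thresholds (fun x => x)
  set n := ts.length with hn
  obtain ⟨hiLe, hiLow, hiHigh⟩ := PySem.List.bisectRight_spec ts l hs
  obtain ⟨hjLe, hjLow, hjHigh⟩ := PySem.List.bisectLeft_spec ts u hs
  set i := PySem.List.bisectRight ts l with hi
  set j := PySem.List.bisectLeft ts u with hj
  -- the three filters in terms of i and j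
  have hbelow : ts.filter (fun t => decide (t ≤ l)) = ts.take i := by
    apply filter_eq_take_of_index _ _ _ hiLe
    · intro k hk hki; simpa using hiLow k hk hki
    · intro k hk hik; simpa using hiHigh k hk hik
  have habove : ts.filter (fun t => decide (t ≥ u)) = ts.drop j := by
    apply filter_eq_drop_of_index _ _ _ hjLe
    · intro k hk hkj; simpa using hjLow k hk hkj
    · intro k hk hjk; simpa using hjHigh k hk hjk
  have hbetween : ts.filter (fun t => decide (l < t) && decide (t < u)) = (ts.drop i).take (j - i) := by
    by_cases hij : j ≤ i
    · have : j - i = 0 := by omega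
      rw [this, List.take_zero]
      apply List.filter_eq_nil_iff.mpr
      intro a ha
      obtain ⟨k, hk, rfl⟩ := List.mem_iff_getElem.mp ha
      by_cases hki : k < i
      · have := hiLow k hk hki; simp; omega
      · have := hjHigh k hk (by omega); simp; omega
    · have hflt : ts.filter (fun t => decide (l < t) && decide (t < u))
          = (ts.filter (fun t => decide (l < t))).filter (fun t => decide (t < u)) := by
        rw [List.filter_filter]
        apply List.filter_congr
        intro a _; simp [Bool.and_comm]
      rw [hflt]
      have hd : ts.filter (fun t => decide (l < t)) = ts.drop i := by
        apply filter_eq_drop_of_index _ _ _ hiLe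
        · intro k hk hki; have := hiLow k hk hki; simp; omega
        · intro k hk hik; have := hiHigh k hk hik; simpa using this
      rw [hd]
      apply filter_eq_take_of_index _ _ _ (by simp; omega)
      · intro k hk hkji
        rw [List.getElem_drop]
        have := hjLow (i + k) (by simp at hk; omega) (by omega)
        simpa using this
      · intro k hk hjik
        rw [List.getElem_drop]
        have := hjHigh (i + k) (by simp at hk; omega) (by omega)
        simp; omega
  rw [hbelow, habove, hbetween]
  congr 1
  · congr 1
    -- getLast? of take i  vs  the i-guard
    by_cases hpos : 0 < i
    · have hlen : (ts.take i).length = i := by simp; omega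
      have h1 : i - 1 < (ts.take i).length := by omega
      have h2 : i - 1 < n := by omega
      rw [List.getLast?_eq_getElem?, hlen, List.getElem?_take, if_pos (show i - 1 < i by omega)]
      simp [hpos, List.getD_eq_getElem?_getD, List.getElem?_eq_getElem h2]
    · have : i = 0 := by omega
      simp [this]
  · -- head? of drop j  vs  the j-guard
    rw [List.head?_drop]
    by_cases hjlt : j < n
    · rw [List.getElem?_eq_getElem hjlt]
      simp [hjlt, List.getD_eq_getElem?_getD, List.getElem?_eq_getElem hjlt]
    · rw [List.getElem?_eq_none (by omega)]
      simp [hjlt]
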